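-- pv_equiv track=rewrite | github.com/tcandzq/LeetCode | DynamicProgramming/FrogJump.py | canCross2
-- ===== SOURCE A (Python) =====
-- from typing import List
--
-- def canCross2(stones: List[int]) -> bool:
--     from functools import lru_cache
--     end = stones[-1]
--     s = set(stones)
--     @lru_cache(None)
--     def dfs(start,jump):
--         if start == end:
--             return True
--         for j in [jump-1,jump,jump+1]:
--             if j <= 0:continue
--             if start+j in s and dfs(start+j,j):
--                 return True
--         return False
--     return dfs(0,0)
-- ===== SOURCE B (Python) =====
-- def canCross2(stones):
--     end = stones[-1]
--     positions = set(stones)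
--     order = sorted(x for x in positions if x > 0)
--     # reach[p] = set of jump sizes with which stone p has been reached; {0} seeds the start.
--     reach = {0: {0}}
--     for p in [0] + order:
--         for j in reach.get(p, ()):
--             for k in (j - 1, j, j + 1):
--                 if k > 0 and p + k in positions:
--                     reach.setdefault(p + k, set()).add(k)
--     return bool(reach.get(end))
-- ===== Notes on version B (the rewrite author's own statement) =====
-- stated objective: alternative
-- what changed: Replaces the top-down memoized DFS over (stone, jump) states with a bottom-up DP that sweeps the positive stone positions in increasing order, maintaining for each stone the set of jump sizes it can be reached with, and answers by looking up the last stone's set.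
import Mathlib
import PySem

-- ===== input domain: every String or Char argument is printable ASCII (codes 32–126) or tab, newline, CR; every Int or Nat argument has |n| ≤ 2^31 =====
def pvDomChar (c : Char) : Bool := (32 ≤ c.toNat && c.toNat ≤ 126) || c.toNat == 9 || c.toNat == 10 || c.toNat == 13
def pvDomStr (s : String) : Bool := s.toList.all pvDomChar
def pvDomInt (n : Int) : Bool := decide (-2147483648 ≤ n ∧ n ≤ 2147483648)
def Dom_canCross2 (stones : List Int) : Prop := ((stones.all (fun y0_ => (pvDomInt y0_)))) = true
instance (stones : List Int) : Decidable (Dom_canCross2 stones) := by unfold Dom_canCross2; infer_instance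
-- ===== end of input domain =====

-- B replaces A's top-down memoized DFS over (stone, jump) states by a bottom-up sweep of the
-- positive stone positions in increasing order, maintaining per stone the set of jump sizes it
-- can be reached with ('alternative': a genuinely different decomposition, same exact result).

-- ===== PORT A =====
-- termination helper for the DFS: each recursive call moves to a strictly larger member of s
lemma pvFilterLtLen (s : List Int) (a b : Int) (hab : a < b) (hb : b ∈ s) :
    (s.filter (fun x => decide (b < x))).length < (s.filter (fun x => decide (a < x))).length := by
  induction s with
  | nil => cases hb
  | cons x t ih =>
    simp only [List.filter_cons]
    rcases List.mem_cons.mp hb with rfl | hbt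
    · have h1 : decide (b < b) = false := by simp
      have h2 : decide (a < b) = true := by simpa using hab
      rw [h1, h2]
      have : (t.filter (fun x => decide (b < x))).length ≤ (t.filter (fun x => decide (a < x))).length := by
        rw [← List.countP_eq_length_filter, ← List.countP_eq_length_filter]
        exact List.countP_mono_left (fun y _ hy => by simpa using lt_trans hab (by simpa using hy))
      simpa using Nat.lt_succ_of_le this
    · by_cases hbx : b < x
      · have hax : a < x := lt_trans hab hbx
        simp [hbx, hax, ih hbt]
      · by_cases hax : a < x
        · simp only [hbx, hax, decide_true, decide_false]
          exact Nat.lt_succ_of_lt (ih hbt)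
        · simp [hbx, hax, ih hbt]

-- dfs(start, jump) of A; the loop over [jump-1, jump, jump+1] with early 'return True' is the
-- three short-circuited disjuncts in the loop's order (lru_cache only memoizes, value unchanged)
def dfsA (s : PySem.Set Int) (e : Int) (start jump : Int) : Bool :=
  if start = e then true
  else
    (if h : 0 < jump - 1 ∧ (start + (jump - 1)) ∈ s then dfsA s e (start + (jump - 1)) (jump - 1) else false) ||
    (if h : 0 < jump ∧ (start + jump) ∈ s then dfsA s e (start + jump) jump else false) ||
    (if h : 0 < jump + 1 ∧ (start + (jump + 1)) ∈ s then dfsA s e (start + (jump + 1)) (jump + 1) else false)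
termination_by (s.filter (fun x => decide (start < x))).length
decreasing_by
  · exact pvFilterLtLen s start (start + (jump - 1)) (by omega) h.2
  · exact pvFilterLtLen s start (start + jump) (by omega) h.2
  · exact pvFilterLtLen s start (start + (jump + 1)) (by omega) h.2

def canCross2 (stones : List Int) : Bool :=
  match PySem.List.pyGet? stones (-1) with       -- end = stones[-1] (IndexError on []: Pre_)
  | none => false
  | some e => dfsA (PySem.Set.ofList stones) e 0 0

-- ===== PORT B =====
-- innermost body: 'if k > 0 and p + k in positions: reach.setdefault(p + k, set()).add(k)'
-- (setdefault + in-place .add is exactly Dict.modify with default empty set)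
def pvStepK (positions : PySem.Set Int) (p : Int) (r : PySem.Dict Int (PySem.Set Int)) (k : Int) :
    PySem.Dict Int (PySem.Set Int) :=
  if 0 < k ∧ (p + k) ∈ positions then r.modify (p + k) [] (fun sj => PySem.Set.add sj k) else r

-- 'for k in (j - 1, j, j + 1): …'
def pvStepJ (positions : PySem.Set Int) (p : Int) (r : PySem.Dict Int (PySem.Set Int)) (j : Int) :
    PySem.Dict Int (PySem.Set Int) :=
  [j - 1, j, j + 1].foldl (pvStepK positions p) r

-- 'for j in reach.get(p, ()): …' (the set iterated is fetched once; updates only touch keys > p)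
def pvStepP (positions : PySem.Set Int) (r : PySem.Dict Int (PySem.Set Int)) (p : Int) :
    PySem.Dict Int (PySem.Set Int) :=
  (r.getD p []).foldl (pvStepJ positions p) r

def canCross2_alt (stones : List Int) : Bool :=
  match PySem.List.pyGet? stones (-1) with       -- end = stones[-1] (IndexError on []: Pre_)
  | none => false
  | some e =>
    let positions : PySem.Set Int := PySem.Set.ofList stones
    let order := PySem.List.sorted (positions.filter (fun x => decide (0 < x))) (fun x => x) false
    let reach := ((0 : Int) :: order).foldl (pvStepP positions) ((PySem.Dict.empty).insert 0 [0])
    !(reach.getD e []).isEmpty                    -- bool(reach.get(end))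

-- ===== PRECONDITION & SPEC =====
-- Pre_ excludes only the empty list, on which A's 'stones[-1]' raises IndexError.
def Pre_canCross2 (stones : List Int) : Prop := stones ≠ []
instance (stones : List Int) : Decidable (Pre_canCross2 stones) := by unfold Pre_canCross2; infer_instance
def pvWitness_canCross2 : List Int := ([0, 1, 3, 5, 6, 8, 12, 17] : List Int)

def Spec_canCross2 (stones : List Int) (out : Bool) : Prop := out = canCross2_alt stones
instance (stones : List Int) (out : Bool) : Decidable (Spec_canCross2 stones out) := by unfold Spec_canCross2; infer_instance

-- ===== CLAIM (what is proved, stated in full; the proofs are below) =====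
def Claim_equal_canCross2 : Prop := ∀ (stones : List Int), Dom_canCross2 stones → Pre_canCross2 stones → Spec_canCross2 stones (canCross2 stones)

-- ===== LEMMAS AND PROOFS =====

-- (q, k) is reachable from the start state (0, 0): a jump of size k > 0 lands on stone q ∈ s,
-- coming from a reachable (p, j) with k ∈ {j-1, j, j+1} (the base also covers q = 0, k = 0)
inductive pvReach (s : List Int) : Int → Int → Prop where
  | base : pvReach s 0 0
  | step (p j k : Int) : pvReach s p j → (k = j - 1 ∨ k = j ∨ k = j + 1) → 0 < k →
      (p + k) ∈ s → pvReach s (p + k) k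

-- e is reachable going forward from state (p, j) — the proposition A's dfs decides
inductive pvRT (s : List Int) (e : Int) : Int → Int → Prop where
  | here (j : Int) : pvRT s e e j
  | step (p j k : Int) : (k = j - 1 ∨ k = j ∨ k = j + 1) → 0 < k → (p + k) ∈ s →
      pvRT s e (p + k) k → pvRT s e p j

-- pvReach restricted to paths whose step sources all lie in A (the processed prefix of B's sweep)
inductive pvRV (s A : List Int) : Int → Int → Prop where
  | base : pvRV s A 0 0
  | step (p j k : Int) : pvRV s A p j → p ∈ A → (k = j - 1 ∨ k = j ∨ k = j + 1) → 0 < k →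
      (p + k) ∈ s → pvRV s A (p + k) k

-- ---- A's DFS decides pvRT ----

lemma pvRT_of_dfsA (s : List Int) (e start jump : Int) :
    dfsA s e start jump = true → pvRT s e start jump := by
  induction start, jump using dfsA.induct (s := s) (e := e) with
  | case1 jump => exact fun _ => pvRT.here jump
  | case2 start jump hne ih1 ih2 ih3 =>
    intro h
    rw [dfsA, if_neg hne] at h
    rcases Bool.or_eq_true_iff.mp h with h | h
    · rcases Bool.or_eq_true_iff.mp h with h | h
      · by_cases hc : 0 < jump - 1 ∧ (start + (jump - 1)) ∈ s
        · rw [dif_pos hc] at h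
          exact pvRT.step start jump (jump - 1) (Or.inl rfl) hc.1 hc.2 (ih1 hc h)
        · rw [dif_neg hc] at h; simp at h
      · by_cases hc : 0 < jump ∧ (start + jump) ∈ s
        · rw [dif_pos hc] at h
          exact pvRT.step start jump jump (Or.inr (Or.inl rfl)) hc.1 hc.2 (ih2 hc h)
        · rw [dif_neg hc] at h; simp at h
    · by_cases hc : 0 < jump + 1 ∧ (start + (jump + 1)) ∈ s
      · rw [dif_pos hc] at h
        exact pvRT.step start jump (jump + 1) (Or.inr (Or.inr rfl)) hc.1 hc.2 (ih3 hc h)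
      · rw [dif_neg hc] at h; simp at h

lemma dfsA_of_pvRT (s : List Int) (e start jump : Int) (h : pvRT s e start jump) :
    dfsA s e start jump = true := by
  induction h with
  | here j => rw [dfsA]; simp
  | step p j k hk hpos hmem _ ih =>
    rw [dfsA]
    by_cases hpe : p = e
    · simp [hpe]
    · rw [if_neg hpe]
      rcases hk with hk | hk | hk <;>
      · rw [← hk]
        have hd : (if h : 0 < k ∧ (p + k) ∈ s then dfsA s e (p + k) k else false) = true := by
          rw [dif_pos ⟨hpos, hmem⟩]; exact ih
        simp [hd]

lemma pvRT_extend (s : List Int) (e p j : Int) (hr : pvReach s p j) (ht : pvRT s e p j) :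
    pvRT s e 0 0 := by
  induction hr with
  | base => exact ht
  | step p' j' k hr' hk hpos hmem ih => exact ih (pvRT.step p' j' k hk hpos hmem ht)

lemma exists_pvReach_of_pvRT (s : List Int) (e p j : Int) (ht : pvRT s e p j)
    (hr : pvReach s p j) : ∃ k, pvReach s e k := by
  induction ht with
  | here j => exact ⟨j, hr⟩
  | step p' j' k hk hpos hmem _ ih => exact ih (pvReach.step p' j' k hr hk hpos hmem)

lemma dfsA_eq_true_iff (s : List Int) (e : Int) :
    dfsA s e 0 0 = true ↔ ∃ k, pvReach s e k := by
  constructor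
  · intro h
    exact exists_pvReach_of_pvRT s e 0 0 (pvRT_of_dfsA s e 0 0 h) pvReach.base
  · rintro ⟨k, hk⟩
    exact dfsA_of_pvRT s e 0 0 (pvRT_extend s e e k hk (pvRT.here k))

-- ---- B's dict updates, membership characterisations ----

lemma mem_pvStepK (s : PySem.Set Int) (p : Int) (r : PySem.Dict Int (PySem.Set Int)) (k q k' : Int) :
    k' ∈ (pvStepK s p r k).getD q [] ↔
      k' ∈ r.getD q [] ∨ (0 < k ∧ (p + k) ∈ s ∧ q = p + k ∧ k' = k) := by
  unfold pvStepK
  split_ifs with hc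
  · rw [PySem.Dict.getD_modify]
    split_ifs with hq
    · rw [PySem.Set.mem_add]
      constructor
      · rintro (h | rfl)
        · exact Or.inl (hq ▸ h)
        · exact Or.inr ⟨hc.1, hc.2, hq, rfl⟩
      · rintro (h | ⟨_, _, _, rfl⟩)
        · exact Or.inl (hq ▸ h)
        · exact Or.inr rfl
    · constructor
      · exact Or.inl
      · rintro (h | ⟨_, _, rfl, _⟩)
        · exact h
        · exact absurd rfl hq
  · constructor
    · exact Or.inl
    · rintro (h | ⟨h1, h2, _, rfl⟩)
      · exact h
      · exact absurd ⟨h1, h2⟩ hc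

lemma mem_pvStepJ (s : PySem.Set Int) (p : Int) (r : PySem.Dict Int (PySem.Set Int)) (j q k' : Int) :
    k' ∈ (pvStepJ s p r j).getD q [] ↔
      k' ∈ r.getD q [] ∨
        ((k' = j - 1 ∨ k' = j ∨ k' = j + 1) ∧ 0 < k' ∧ q = p + k' ∧ (p + k') ∈ s) := by
  unfold pvStepJ
  simp only [List.foldl_cons, List.foldl_nil]
  rw [mem_pvStepK, mem_pvStepK, mem_pvStepK]
  constructor
  · rintro (((h | ⟨h1, h2, h3, rfl⟩) | ⟨h1, h2, h3, rfl⟩) | ⟨h1, h2, h3, rfl⟩)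
    · exact Or.inl h
    · exact Or.inr ⟨Or.inl rfl, h1, h3, h2⟩
    · exact Or.inr ⟨Or.inr (Or.inl rfl), h1, h3, h2⟩
    · exact Or.inr ⟨Or.inr (Or.inr rfl), h1, h3, h2⟩
  · rintro (h | ⟨rfl | rfl | rfl, h2, h3, h4⟩)
    · exact Or.inl (Or.inl (Or.inl h))
    · exact Or.inl (Or.inl (Or.inr ⟨h2, h4, h3, rfl⟩))
    · exact Or.inl (Or.inr ⟨h2, h4, h3, rfl⟩)
    · exact Or.inr ⟨h2, h4, h3, rfl⟩

lemma mem_foldl_pvStepJ (s : PySem.Set Int) (p : Int) (L : List Int) :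
    ∀ (r : PySem.Dict Int (PySem.Set Int)) (q k' : Int),
      k' ∈ (L.foldl (pvStepJ s p) r).getD q [] ↔
        k' ∈ r.getD q [] ∨
          ∃ j ∈ L, (k' = j - 1 ∨ k' = j ∨ k' = j + 1) ∧ 0 < k' ∧ q = p + k' ∧ (p + k') ∈ s := by
  induction L with
  | nil => simp
  | cons j t ih =>
    intro r q k'
    simp only [List.foldl_cons]
    rw [ih, mem_pvStepJ]
    constructor
    · rintro ((h | ⟨hc, h2, h3, h4⟩) | ⟨j', hj', hrest⟩)
      · exact Or.inl h
      · exact Or.inr ⟨j, List.mem_cons_self .., hc, h2, h3, h4⟩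
      · exact Or.inr ⟨j', List.mem_cons_of_mem j hj', hrest⟩
    · rintro (h | ⟨j', hj', hrest⟩)
      · exact Or.inl (Or.inl h)
      · rcases List.mem_cons.mp hj' with rfl | hj't
        · exact Or.inl (Or.inr hrest)
        · exact Or.inr ⟨j', hj't, hrest⟩

-- ---- pvRV facts ----

lemma pvRV_mono (s A B : List Int) (hAB : ∀ x ∈ A, x ∈ B) (q k : Int) (h : pvRV s A q k) :
    pvRV s B q k := by
  induction h with
  | base => exact pvRV.base
  | step p j k hp hpA hk hpos hmem ih => exact pvRV.step p j k ih (hAB p hpA) hk hpos hmem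

lemma pvRV_nil (s : List Int) (q k : Int) (h : pvRV s [] q k) : q = 0 ∧ k = 0 := by
  cases h with
  | base => exact ⟨rfl, rfl⟩
  | step p j k _ hpA => cases hpA

lemma pvRV_cons_iff (s A : List Int) (p : Int) (hA : ∀ a ∈ A, a < p) (q k : Int) :
    pvRV s (p :: A) q k ↔
      pvRV s A q k ∨
        ∃ j, pvRV s A p j ∧ (k = j - 1 ∨ k = j ∨ k = j + 1) ∧ 0 < k ∧ q = p + k ∧ q ∈ s := by
  constructor
  · intro h
    induction h with
    | base => exact Or.inl pvRV.base
    | step p' j k _ hpA hk hpos hmem ih =>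
      rcases ih with h' | ⟨j0, _, _, hpos0, heq0, _⟩
      · rcases List.mem_cons.mp hpA with rfl | hpA'
        · exact Or.inr ⟨j, h', hk, hpos, rfl, hmem⟩
        · exact Or.inl (pvRV.step p' j k h' hpA' hk hpos hmem)
      · -- p' = p + j' with 0 < j', so p < p'; but p' ∈ p :: A forces p' ≤ p: impossible
        exfalso
        rcases List.mem_cons.mp hpA with rfl | hpA'
        · omega
        · have := hA p' hpA'; omega
  · rintro (h | ⟨j, hj, hk, hpos, rfl, hmem⟩)
    · exact pvRV_mono s A (p :: A) (fun x hx => List.mem_cons_of_mem p hx) q k h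
    · exact pvRV.step p j k (pvRV_mono s A (p :: A) (fun x hx => List.mem_cons_of_mem p hx) p j hj)
        (List.mem_cons_self ..) hk hpos hmem

-- ---- the sweep invariant ----

def pvInv (s A : List Int) (r : PySem.Dict Int (PySem.Set Int)) : Prop :=
  ∀ q k, k ∈ r.getD q [] ↔ pvRV s A q k

lemma pvInv_congr (s A B : List Int) (hAB : ∀ x, x ∈ A ↔ x ∈ B)
    (r : PySem.Dict Int (PySem.Set Int)) (h : pvInv s A r) : pvInv s B r := by
  intro q k
  rw [h q k]
  exact ⟨pvRV_mono s A B (fun x hx => (hAB x).mp hx) q k,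
         pvRV_mono s B A (fun x hx => (hAB x).mpr hx) q k⟩

lemma pvInv_stepP (s A : List Int) (p : Int) (hA : ∀ a ∈ A, a < p)
    (r : PySem.Dict Int (PySem.Set Int)) (h : pvInv s A r) : pvInv s (p :: A) (pvStepP s r p) := by
  intro q k
  unfold pvStepP
  rw [mem_foldl_pvStepJ, pvRV_cons_iff s A p hA]
  constructor
  · rintro (hq | ⟨j, hjmem, hk, hpos, rfl, hmem⟩)
    · exact Or.inl ((h q k).mp hq)
    · exact Or.inr ⟨j, (h p j).mp hjmem, hk, hpos, rfl, hmem⟩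
  · rintro (hq | ⟨j, hj, hk, hpos, rfl, hmem⟩)
    · exact Or.inl ((h q k).mpr hq)
    · exact Or.inr ⟨j, (h p j).mpr hj, hk, hpos, rfl, hmem⟩

lemma pvInv_foldl (s : List Int) (L : List Int) :
    ∀ (A : List Int) (r : PySem.Dict Int (PySem.Set Int)),
      L.Pairwise (· < ·) → (∀ a ∈ A, ∀ x ∈ L, a < x) → pvInv s A r →
      pvInv s (L ++ A) (L.foldl (pvStepP s) r) := by
  induction L with
  | nil => intro A r _ _ h; simpa using h
  | cons p t ih =>
    intro A r hpw hAL hinv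
    simp only [List.foldl_cons]
    have h1 : pvInv s (p :: A) (pvStepP s r p) :=
      pvInv_stepP s A p (fun a ha => hAL a ha p (List.mem_cons_self ..)) r hinv
    have h2 : pvInv s (t ++ p :: A) (t.foldl (pvStepP s) (pvStepP s r p)) := by
      refine ih (p :: A) (pvStepP s r p) (List.Pairwise.of_cons hpw) ?_ h1
      intro a ha x hx
      rcases List.mem_cons.mp ha with rfl | ha'
      · exact (List.pairwise_cons.mp hpw).1 x hx
      · exact hAL a ha' x (List.mem_cons_of_mem p hx)
    refine pvInv_congr s (t ++ p :: A) (p :: t ++ A) (fun x => ?_) _ h2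
    simp only [List.mem_append, List.mem_cons]
    tauto

-- ---- connecting pvRV over the full sweep list with pvReach ----

lemma pvReach_nonneg (s : List Int) (q k : Int) (h : pvReach s q k) : 0 ≤ q := by
  induction h with
  | base => omega
  | step p j k _ _ hpos _ ih => omega

lemma pvReach_src (s : List Int) (q k : Int) (h : pvReach s q k) :
    q = 0 ∨ (q ∈ s ∧ 0 < q) := by
  cases h with
  | base => exact Or.inl rfl
  | step p j k hr _ hpos hmem =>
    have := pvReach_nonneg s p j hr
    exact Or.inr ⟨hmem, by omega⟩

lemma pvReach_of_pvRV (s A : List Int) (q k : Int) (h : pvRV s A q k) : pvReach s q k := by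
  induction h with
  | base => exact pvReach.base
  | step p j k _ _ hk hpos hmem ih => exact pvReach.step p j k ih hk hpos hmem

lemma pvRV_of_pvReach (s L : List Int) (hL : ∀ x, x = 0 ∨ (x ∈ s ∧ 0 < x) → x ∈ L)
    (q k : Int) (h : pvReach s q k) : pvRV s L q k := by
  induction h with
  | base => exact pvRV.base
  | step p j k hr hk hpos hmem ih =>
    exact pvRV.step p j k ih (hL p (pvReach_src s p j hr)) hk hpos hmem

-- ---- assembling B's characterisation ----

lemma canCross2_alt_char (stones : List Int) (e : Int)
    (hget : PySem.List.pyGet? stones (-1) = some e) :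
    (canCross2_alt stones = true ↔ ∃ k, pvReach (PySem.Set.ofList stones) e k) := by
  unfold canCross2_alt
  rw [hget]
  set s : PySem.Set Int := PySem.Set.ofList stones with hs
  set order := PySem.List.sorted (s.filter (fun x => decide (0 < x))) (fun x => x) false with horder
  -- the sweep list 0 :: order is strictly increasing
  have hperm : order.Perm (s.filter (fun x => decide (0 < x))) := PySem.List.sorted_perm ..
  have hmemo : ∀ x, x ∈ order ↔ (x ∈ s ∧ 0 < x) := by
    intro x
    rw [hperm.mem_iff, List.mem_filter]
    simp
  have hnd : order.Nodup := hperm.nodup_iff.mpr ((PySem.Set.nodup_ofList stones).filter _)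
  have hle : order.Pairwise (· ≤ ·) := PySem.List.sorted_pairwise ..
  have hlt : order.Pairwise (· < ·) := by
    have := hle.and hnd
    exact this.imp (fun h => lt_of_le_of_ne h.1 h.2)
  have hpw : ((0 : Int) :: order).Pairwise (· < ·) :=
    List.pairwise_cons.mpr ⟨fun x hx => ((hmemo x).mp hx).2, hlt⟩
  -- the initial dict {0: {0}} satisfies the invariant for the empty processed set
  have hinit : pvInv s [] ((PySem.Dict.empty).insert 0 [0]) := by
    intro q k
    rw [PySem.Dict.getD_insert, PySem.Dict.getD_empty]
    constructor
    · intro h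
      split_ifs at h with hq
      · simp at h
        subst hq; subst h
        exact pvRV.base
      · simp at h
    · intro h
      rcases pvRV_nil s q k h with ⟨rfl, rfl⟩
      simp
  have hinv : pvInv s (((0 : Int) :: order) ++ []) (((0 : Int) :: order).foldl (pvStepP s) ((PySem.Dict.empty).insert 0 [0])) :=
    pvInv_foldl s ((0 : Int) :: order) [] _ hpw (by simp) hinit
  have hL : ∀ x, x = 0 ∨ (x ∈ s ∧ 0 < x) → x ∈ (((0 : Int) :: order) ++ []) := by
    intro x hx
    rcases hx with rfl | hx
    · simp
    · simp [List.mem_cons, (hmemo x).mpr hx]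
  constructor
  · intro h
    rw [Bool.not_eq_true'] at h
    rcases List.isEmpty_eq_false_iff_exists_mem.mp h with ⟨k, hk⟩
    exact ⟨k, pvReach_of_pvRV s _ e k ((hinv e k).mp hk)⟩
  · rintro ⟨k, hk⟩
    have hmem : k ∈ ((((0 : Int) :: order)).foldl (pvStepP s) ((PySem.Dict.empty).insert 0 [0])).getD e [] :=
      (hinv e k).mpr (pvRV_of_pvReach s _ hL e k hk)
    rw [Bool.not_eq_true']
    exact List.isEmpty_eq_false_iff_exists_mem.mpr ⟨k, hmem⟩

-- ===== VERDICT (by name: the statement is the Claim_ definition above) =====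
theorem canCross2_spec : Claim_equal_canCross2 := by
  intro stones _ _
  unfold Spec_canCross2
  cases hget : PySem.List.pyGet? stones (-1) with
  | none =>
    unfold canCross2 canCross2_alt
    rw [hget]
  | some e =>
    have hA : canCross2 stones = true ↔ ∃ k, pvReach (PySem.Set.ofList stones) e k := by
      unfold canCross2
      rw [hget]
      exact dfsA_eq_true_iff (PySem.Set.ofList stones) e
    have hB := canCross2_alt_char stones e hget
    exact Bool.eq_iff_iff.mpr (hA.trans hB.symm)
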